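-- pv_equiv track=rewrite | github.com/stephenthajeb/Corona-Info-Extraction-Web-App | src/patternMatching.py | closestToKeyword
-- ===== SOURCE A (Python) =====
-- def closestToKeyword (firstIdx,wantedData,pattern):
--     distance = []
--     for position in wantedData:
--         if (wantedData == []):
--             return []
--         if position[0] < firstIdx:
--             distance.append(abs(position[1]-firstIdx))
--         else:
--             distance.append(abs(position[0]-(len(pattern)-1+firstIdx)))
--     return (wantedData[distance.index(min(distance))])
-- ===== SOURCE B (Python) =====
-- def closestToKeyword(firstIdx, wantedData, pattern):
--     # Single pass keeping a running best (position, distance) pair; no parallel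
--     # distance list and no min/.index re-scan. Raises on empty wantedData like A.
--     edge = len(pattern) - 1 + firstIdx
--
--     def dist(p):
--         return abs(p[1] - firstIdx) if p[0] < firstIdx else abs(p[0] - edge)
--
--     best = wantedData[0]
--     bestD = dist(best)
--     for p in wantedData[1:]:
--         d = dist(p)
--         if d < bestD:
--             best, bestD = p, d
--     return best
-- ===== Notes on version B (the rewrite author's own statement) =====
-- stated objective: simpler
-- what changed: Replaced the parallel distance-list construction followed by min() and .index() re-scans with one pass that keeps a running (best, bestDistance) pair, updating only on a strictly smaller distance so the first minimum still wins.
import Mathlib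
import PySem

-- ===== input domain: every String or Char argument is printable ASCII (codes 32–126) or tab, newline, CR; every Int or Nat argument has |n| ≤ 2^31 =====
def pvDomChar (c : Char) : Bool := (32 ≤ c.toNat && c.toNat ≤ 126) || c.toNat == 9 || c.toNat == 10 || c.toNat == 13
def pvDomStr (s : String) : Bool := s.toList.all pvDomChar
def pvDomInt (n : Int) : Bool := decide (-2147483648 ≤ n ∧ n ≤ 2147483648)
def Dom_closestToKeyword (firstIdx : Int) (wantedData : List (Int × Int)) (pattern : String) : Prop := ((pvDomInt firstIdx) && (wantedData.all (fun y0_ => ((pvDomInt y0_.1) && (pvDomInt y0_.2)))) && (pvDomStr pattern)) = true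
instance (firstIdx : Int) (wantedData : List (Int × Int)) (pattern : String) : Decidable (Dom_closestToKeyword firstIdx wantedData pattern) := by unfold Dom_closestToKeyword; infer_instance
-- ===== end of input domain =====

-- B replaces A's distance list + min()/.index() re-scans by a single running-minimum pass; same value on every nonempty wantedData.

-- ===== PORT A =====
-- Literal port of A's loop building the parallel `distance` list, then
-- wantedData[distance.index(min(distance))].  The in-loop `if wantedData == []:
-- return []` is unreachable (the loop body only runs when wantedData is nonempty)
-- and is omitted.  min([]) raises ValueError in Python: min? returns none there,
-- excluded by Pre_; the (0,0) defaults below are only on those excluded paths.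
def closestToKeyword (firstIdx : Int) (wantedData : List (Int × Int)) (pattern : String) : Int × Int :=
  let distance := wantedData.foldl
    (fun d position =>
      if position.1 < firstIdx then d ++ [|position.2 - firstIdx|]
      else d ++ [|position.1 - (PySem.Str.len pattern - 1 + firstIdx)|]) []
  match PySem.List.min? distance (fun y => y) with
  | none => (0, 0)
  | some m =>
    match PySem.List.index? distance m with
    | none => (0, 0)
    | some i => (PySem.List.pyGet? wantedData (i : Int)).getD (0, 0)

-- ===== PORT B =====
def pvKeyB (firstIdx edge : Int) (p : Int × Int) : Int :=
  if p.1 < firstIdx then |p.2 - firstIdx| else |p.1 - edge|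

-- Port of Source B: one pass with a running (best, bestDistance) pair.
-- wantedData[0] raises IndexError on [] in Python: excluded by Pre_.
def closestToKeyword_alt (firstIdx : Int) (wantedData : List (Int × Int)) (pattern : String) : Int × Int :=
  let edge := PySem.Str.len pattern - 1 + firstIdx
  match wantedData with
  | [] => (0, 0)
  | h :: t =>
    (t.foldl
      (fun best p =>
        let d := pvKeyB firstIdx edge p
        if d < best.2 then (p, d) else best)
      (h, pvKeyB firstIdx edge h)).1

-- ===== PRECONDITION & SPEC =====
-- Pre_ excludes only the empty list, on which A raises ValueError (min of empty).
def Pre_closestToKeyword (firstIdx : Int) (wantedData : List (Int × Int)) (pattern : String) : Prop :=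
  wantedData ≠ []
instance (firstIdx : Int) (wantedData : List (Int × Int)) (pattern : String) : Decidable (Pre_closestToKeyword firstIdx wantedData pattern) := by unfold Pre_closestToKeyword; infer_instance

def pvWitness_closestToKeyword : Int × (List (Int × Int)) × String := (2, [(0, 5), (3, 1)], "ab")

def Spec_closestToKeyword (firstIdx : Int) (wantedData : List (Int × Int)) (pattern : String) (out : Int × Int) : Prop := out = closestToKeyword_alt firstIdx wantedData pattern
instance (firstIdx : Int) (wantedData : List (Int × Int)) (pattern : String) (out : Int × Int) : Decidable (Spec_closestToKeyword firstIdx wantedData pattern out) := by unfold Spec_closestToKeyword; infer_instance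

-- ===== CLAIM (what is proved, stated in full; the proofs are below) =====
def Claim_equal_closestToKeyword : Prop := ∀ (firstIdx : Int) (wantedData : List (Int × Int)) (pattern : String), Dom_closestToKeyword firstIdx wantedData pattern → Pre_closestToKeyword firstIdx wantedData pattern → Spec_closestToKeyword firstIdx wantedData pattern (closestToKeyword firstIdx wantedData pattern)

-- ===== LEMMAS AND PROOFS =====

-- first element attaining the minimum of `k` over b :: t, computed from the right
def pvFm {α : Type} (k : α → Int) : α → List α → α
  | b, [] => b
  | b, x :: t => let y := pvFm k x t; if k b ≤ k y then b else y

theorem pvFoldlMin (l : List Int) : ∀ a b : Int, l.foldl min (min a b) = min a (l.foldl min b) := by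
  induction l with
  | nil => intro a b; simp
  | cons c l ih =>
    intro a b
    simp only [List.foldl_cons]
    rw [min_assoc, ih]

theorem pvFm_key {α : Type} (k : α → Int) (t : List α) : ∀ (b : α),
    k (pvFm k b t) = (t.map k).foldl min (k b) := by
  induction t with
  | nil => intro b; simp [pvFm]
  | cons x t ih =>
    intro b
    simp only [pvFm, List.map_cons, List.foldl_cons]
    rw [pvFoldlMin, ← ih x]
    by_cases h : k b ≤ k (pvFm k x t) <;> simp [h] <;> omega

theorem pvFm_step {α : Type} (k : α → Int) (b x : α) (t : List α) :
    pvFm k b (x :: t) = pvFm k (if k x < k b then x else b) t := by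
  cases t with
  | nil =>
    simp only [pvFm]
    split_ifs <;> first | rfl | omega
  | cons y t' =>
    simp only [pvFm]
    split_ifs <;> first | rfl | omega

theorem pvFold {α : Type} (k : α → Int) (t : List α) : ∀ (b : α),
    (t.foldl (fun best p => let d := k p; if d < best.2 then (p, d) else best) (b, k b)).1
      = pvFm k b t := by
  induction t with
  | nil => intro b; simp [pvFm]
  | cons x t ih =>
    intro b
    rw [pvFm_step]
    simp only [List.foldl_cons]
    by_cases h : k x < k b <;> simp [h, ih]

theorem pvDist {α : Type} (f : α → Int) (l : List α) : ∀ (acc : List Int),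
    l.foldl (fun d p => d ++ [f p]) acc = acc ++ l.map f := by
  induction l with
  | nil => intro acc; simp
  | cons x l ih => intro acc; simp [ih]

theorem pvIdx {α : Type} (k : α → Int) (t : List α) : ∀ (h : α),
    ∃ i, PySem.List.index? ((h :: t).map k) ((t.map k).foldl min (k h)) = some i ∧
      PySem.List.pyGet? (h :: t) (i : Int) = some (pvFm k h t) := by
  induction t with
  | nil =>
    intro h
    exact ⟨0, by simp [PySem.List.index?, pvFm, PySem.List.pyGet?, PySem.List.pyIdx?]⟩
  | cons x t ih =>
    intro h
    obtain ⟨i, hi, hg⟩ := ih x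
    by_cases hle : k h ≤ (t.map k).foldl min (k x)
    · refine ⟨0, ?_, ?_⟩
      · have : ((x :: t).map k).foldl min (k h) = k h := by
          simp only [List.map_cons, List.foldl_cons]
          rw [pvFoldlMin]
          omega
        rw [this]
        simp only [List.map_cons]
        exact PySem.List.index?_cons_self (k h) (k x :: t.map k)
      · have hfm : pvFm k h (x :: t) = h := by
          simp only [pvFm]
          rw [pvFm_key k t]
          simp [hle]
        rw [hfm]
        simpa using PySem.List.pyGet?_zero_cons h (x :: t)
    · have hM : ((x :: t).map k).foldl min (k h) = (t.map k).foldl min (k x) := by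
        simp only [List.map_cons, List.foldl_cons]
        rw [pvFoldlMin]
        omega
      have hne : k h ≠ (t.map k).foldl min (k x) := by omega
      refine ⟨i + 1, ?_, ?_⟩
      · rw [hM]
        have := PySem.List.index?_cons_of_ne (x := k h) (xs := (x :: t).map k)
          (v := (t.map k).foldl min (k x)) hne
        simp only [List.map_cons] at this hi ⊢
        rw [this, hi]
        rfl
      · have hfm : pvFm k h (x :: t) = pvFm k x t := by
          simp only [pvFm]
          rw [pvFm_key k t]
          simp [hle]
        rw [hfm]
        have hc : ((i + 1 : Nat) : Int) = (i : Int) + 1 := by push_cast; ring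
        rw [hc, PySem.List.pyGet?_cons_succ]
        exact hg

-- ===== VERDICT (by name: the statement is the Claim_ definition above) =====
theorem closestToKeyword_spec : Claim_equal_closestToKeyword := by
  intro firstIdx wantedData pattern _ hpre
  unfold Spec_closestToKeyword
  cases wantedData with
  | nil => exact absurd rfl hpre
  | cons h t =>
    set k : Int × Int → Int :=
      fun p => if p.1 < firstIdx then |p.2 - firstIdx|
               else |p.1 - (PySem.Str.len pattern - 1 + firstIdx)| with hk
    have hfun : (fun (d : List Int) (position : Int × Int) =>
        if position.1 < firstIdx then d ++ [|position.2 - firstIdx|]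
        else d ++ [|position.1 - (PySem.Str.len pattern - 1 + firstIdx)|])
        = fun d p => d ++ [k p] := by
      funext d p
      by_cases hp : p.1 < firstIdx <;> simp [hk, hp]
    have hdist : (h :: t).foldl
        (fun d position =>
          if position.1 < firstIdx then d ++ [|position.2 - firstIdx|]
          else d ++ [|position.1 - (PySem.Str.len pattern - 1 + firstIdx)|]) []
        = (h :: t).map k := by
      rw [hfun, pvDist]
      simp
    have hmin : PySem.List.min? ((h :: t).map k) (fun y => y)
        = some ((t.map k).foldl min (k h)) := by
      simp only [List.map_cons]
      exact PySem.List.min?_id_cons (k h) (t.map k)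
    obtain ⟨i, hi, hg⟩ := pvIdx k t h
    have hB : closestToKeyword_alt firstIdx (h :: t) pattern = pvFm k h t := by
      unfold closestToKeyword_alt
      have hkeq : pvKeyB firstIdx (PySem.Str.len pattern - 1 + firstIdx) = k := by
        funext p; simp [pvKeyB, hk]
      simp only [hkeq]
      exact pvFold k t h
    unfold closestToKeyword
    simp only [hdist, hmin, hi, hg, hB, Option.getD_some]
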